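-- pv_equiv track=rewrite | github.com/JordenDan/LeetCodePython | 0001~0050/0030_与所有单词相关联的字串/findSubstring.py | getWordsMap
-- ===== SOURCE A (Python) =====
-- from collections import Counter
--
-- def getWordsMap(words):
--     wordsIdx = Counter(words)
--     lenPre = -1
--     for word in words:
--         lenWord = len(word)
--         if lenPre != -1 and lenPre != lenWord:
--             return Counter(), -1
--         lenPre = lenWord
--     return wordsIdx, lenPre
-- ===== SOURCE B (Python) =====
-- from collections import Counter
--
-- def getWordsMap(words):
--     words = list(words)
--     if not words:
--         return Counter(), -1
--     lo = min(map(len, words))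
--     hi = max(map(len, words))
--     if lo == hi:
--         return Counter(words), lo
--     return Counter(), -1
-- ===== Notes on version B (the rewrite author's own statement) =====
-- stated objective: alternative
-- what changed: Replaces A's sequential compare-with-previous scan (with the -1 sentinel and early return) by two staged extremal reductions: compute min and max of the word lengths and test min == max, which holds exactly when all lengths are uniform.
import Mathlib
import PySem

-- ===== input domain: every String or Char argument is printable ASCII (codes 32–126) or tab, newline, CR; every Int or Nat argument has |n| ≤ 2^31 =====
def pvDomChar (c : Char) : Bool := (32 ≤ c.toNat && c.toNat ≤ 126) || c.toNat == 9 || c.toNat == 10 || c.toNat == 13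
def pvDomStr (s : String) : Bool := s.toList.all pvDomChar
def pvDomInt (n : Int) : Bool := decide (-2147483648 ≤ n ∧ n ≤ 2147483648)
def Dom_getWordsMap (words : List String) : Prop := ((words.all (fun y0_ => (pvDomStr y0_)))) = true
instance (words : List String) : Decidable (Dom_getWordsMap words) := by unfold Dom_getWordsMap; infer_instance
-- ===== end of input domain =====

-- B replaces A's sequential compare-with-previous length scan by two staged extremal reductions (min and max of the lengths) and a min == max test (objective: alternative).


-- ===== PORT A =====
-- loop over words carrying lenPre (starts at -1), early-returning (Counter(), -1) on a length mismatch
def getWordsMapLoop (wordsIdx : PySem.Dict String Int) (ws : List String) (lenPre : Int) : (List (String × Int)) × Int :=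
  match ws with
  | [] => (wordsIdx.items, lenPre)
  | word :: rest =>
    let lenWord : Int := PySem.Str.len word
    if lenPre ≠ -1 ∧ lenPre ≠ lenWord then ((PySem.Dict.empty : PySem.Dict String Int).items, -1)
    else getWordsMapLoop wordsIdx rest lenWord

def getWordsMap (words : List String) : (List (String × Int)) × Int :=
  let wordsIdx := PySem.Dict.counter words
  getWordsMapLoop wordsIdx words (-1)

-- ===== PORT B =====
-- empty check, then lo = min of the lengths, hi = max of the lengths, compare lo == hi
def getWordsMap_alt (words : List String) : (List (String × Int)) × Int :=
  match words with
  | [] => ((PySem.Dict.empty : PySem.Dict String Int).items, -1)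
  | w :: rest =>
    let lens : List Int := (w :: rest).map (fun x => (PySem.Str.len x : Int))
    match PySem.List.min? lens (fun x => x), PySem.List.max? lens (fun x => x) with
    | some lo, some hi =>
      if lo == hi then ((PySem.Dict.counter (w :: rest)).items, lo)
      else ((PySem.Dict.empty : PySem.Dict String Int).items, -1)
    | _, _ => ((PySem.Dict.empty : PySem.Dict String Int).items, -1)  -- unreachable: lens is nonempty

-- ===== PRECONDITION & SPEC =====
def Spec_getWordsMap (words : List String) (out : (List (String × Int)) × Int) : Prop := out = getWordsMap_alt words
instance (words : List String) (out : (List (String × Int)) × Int) : Decidable (Spec_getWordsMap words out) := by unfold Spec_getWordsMap; infer_instance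

-- ===== CLAIM (what is proved, stated in full; the proofs are below) =====
def Claim_equal_getWordsMap : Prop := ∀ (words : List String), Dom_getWordsMap words → Spec_getWordsMap words (getWordsMap words)

-- ===== LEMMAS AND PROOFS =====

lemma loop_spec (c : PySem.Dict String Int) (ws : List String) (lenPre : Int) (h : 0 ≤ lenPre) :
    getWordsMapLoop c ws lenPre =
      if ∀ w ∈ ws, (PySem.Str.len w : Int) = lenPre then (c.items, lenPre)
      else ((PySem.Dict.empty : PySem.Dict String Int).items, -1) := by
  induction ws with
  | nil => simp [getWordsMapLoop]
  | cons w rest ih =>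
    have hne : lenPre ≠ -1 := by omega
    by_cases hw : (PySem.Str.len w : Int) = lenPre
    · rw [getWordsMapLoop]
      simp only [hw]
      rw [if_neg (by simp), ih]
      by_cases hall : ∀ x ∈ rest, (PySem.Str.len x : Int) = lenPre
      · rw [if_pos hall, if_pos (by
          intro x hx
          rcases List.mem_cons.mp hx with rfl | hx
          · exact hw
          · exact hall x hx)]
      · rw [if_neg hall, if_neg (by intro hc; exact hall (fun x hx => hc x (by simp [hx])))]
    · rw [getWordsMapLoop]
      rw [if_pos ⟨hne, fun he => hw he.symm⟩,
          if_neg (by intro hc; exact hw (hc w (by simp)))]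

-- for a nonempty Int list: min equals max iff every element equals the head
lemma minmax_eq_iff (a : Int) (t : List Int) (m M : Int)
    (hm : PySem.List.min? (a :: t) (fun x => x) = some m)
    (hM : PySem.List.max? (a :: t) (fun x => x) = some M) :
    (m = M ↔ ∀ x ∈ t, x = a) := by
  have hmmem : m ∈ a :: t := PySem.List.min?_mem hm
  have hMmem : M ∈ a :: t := PySem.List.max?_mem hM
  have hmin : ∀ y ∈ a :: t, m ≤ y := by
    intro y hy; simpa using PySem.List.min?_isMin hm y hy
  have hmax : ∀ y ∈ a :: t, y ≤ M := by
    intro y hy; simpa using PySem.List.max?_isMax hM y hy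
  constructor
  · intro heq x hx
    have h1 := hmin x (by simp [hx])
    have h2 := hmax x (by simp [hx])
    have h3 := hmin a (by simp)
    have h4 := hmax a (by simp)
    omega
  · intro hall
    have hma : m = a := by
      rcases List.mem_cons.mp hmmem with h | h
      · exact h
      · exact hall m h
    have hMa : M = a := by
      rcases List.mem_cons.mp hMmem with h | h
      · exact h
      · exact hall M h
    omega

lemma min_eq_head (a : Int) (t : List Int) (m : Int)
    (hm : PySem.List.min? (a :: t) (fun x => x) = some m)
    (hall : ∀ x ∈ t, x = a) : m = a := by
  rcases List.mem_cons.mp (PySem.List.min?_mem hm) with h | h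
  · exact h
  · exact hall m h

-- ===== VERDICT (by name: the statement is the Claim_ definition above) =====
theorem getWordsMap_spec : Claim_equal_getWordsMap := by
  intro words _
  unfold Spec_getWordsMap getWordsMap getWordsMap_alt
  match words with
  | [] => rfl
  | w :: rest =>
    have h0 : (0 : Int) ≤ PySem.Str.len w := by simp [PySem.Str.len]
    rw [show getWordsMapLoop (PySem.Dict.counter (w :: rest)) (w :: rest) (-1)
          = getWordsMapLoop (PySem.Dict.counter (w :: rest)) rest (PySem.Str.len w) from by
        rw [getWordsMapLoop]; simp]
    rw [loop_spec _ _ _ h0]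
    have hm := PySem.List.min?_id_cons (PySem.Str.len w : Int) (rest.map (fun x => (PySem.Str.len x : Int)))
    have hM := PySem.List.max?_id_cons (PySem.Str.len w : Int) (rest.map (fun x => (PySem.Str.len x : Int)))
    have hiff := minmax_eq_iff _ _ _ _ hm hM
    simp only [List.map_cons]
    rw [hm, hM]
    by_cases hall : ∀ x ∈ rest, (PySem.Str.len x : Int) = (PySem.Str.len w : Int)
    · have hall' : ∀ x ∈ rest.map (fun x => (PySem.Str.len x : Int)), x = (PySem.Str.len w : Int) := by
        intro x hx; obtain ⟨y, hy, rfl⟩ := List.mem_map.mp hx; exact hall y hy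
      have hmM := hiff.mpr hall'
      have hma := min_eq_head _ _ _ hm hall'
      rw [if_pos hall]
      simp only [hmM, beq_self_eq_true, if_true]
      rw [hma] at hmM
      rw [← hmM]
    · have hmM : ¬ ((rest.map (fun x => (PySem.Str.len x : Int))).foldl min (PySem.Str.len w)
          = (rest.map (fun x => (PySem.Str.len x : Int))).foldl max (PySem.Str.len w)) := by
        intro h
        exact hall (fun x hx => hiff.mp h _ (List.mem_map.mpr ⟨x, hx, rfl⟩))
      rw [if_neg hall]
      simp only []
      rw [if_neg (by simpa using hmM)]
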